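-- pv_equiv track=rewrite | github.com/CWei88/Python | CS1010S/Practical Cheat Sheet.py | floyd_row
-- ===== SOURCE A (Python) =====
-- def floyd_row(n):
--     result = []
--     count = 1
--
--     for i in range(1, n + 1):
--         inter = []
--         for j in range(1, i + 1):
--             inter.append(count)
--             count = count + 1
--         result.append(tuple(inter))
--     final = tuple(result)
--     return final[n - 1]
-- ===== SOURCE B (Python) =====
-- def floyd_row(n):
--     start = (n - 1) * n // 2 + 1
--     return tuple(range(start, start + n))
-- ===== Notes on version B (the rewrite author's own statement) =====
-- stated objective: faster
-- what changed: Closed form: row n of Floyd's triangle starts at (n-1)n/2+1, so B returns range(start, start+n) directly instead of building the whole triangle with nested loops.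
import Mathlib
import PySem

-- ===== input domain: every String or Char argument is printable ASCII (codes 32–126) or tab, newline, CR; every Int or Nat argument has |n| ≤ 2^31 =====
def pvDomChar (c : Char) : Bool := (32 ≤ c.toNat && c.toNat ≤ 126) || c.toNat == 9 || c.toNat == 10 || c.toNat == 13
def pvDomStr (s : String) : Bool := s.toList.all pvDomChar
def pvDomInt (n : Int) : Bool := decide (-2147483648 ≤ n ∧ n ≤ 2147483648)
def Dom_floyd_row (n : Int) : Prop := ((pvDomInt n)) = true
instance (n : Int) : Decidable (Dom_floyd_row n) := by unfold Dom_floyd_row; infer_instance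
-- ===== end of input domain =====

-- B replaces A's O(n^2) triangle construction with the closed-form row start (n-1)n/2+1 and a single range (objective: faster).


-- ===== PORT A =====
def floyd_row (n : Int) : List Int :=
  let st :=
    (PySem.List.pyRange 1 (n + 1) 1).foldl
      (fun (st : List (List Int) × Int) i =>
        let inner :=
          (PySem.List.pyRange 1 (i + 1) 1).foldl
            (fun (st2 : List Int × Int) _j => (st2.1 ++ [st2.2], st2.2 + 1))
            ([], st.2)
        (st.1 ++ [inner.1], inner.2))
      ([], 1)
  -- final[n - 1]: IndexError (none) excluded by Pre_floyd_row
  (PySem.List.pyGet? st.1 (n - 1)).getD []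

-- ===== PORT B =====
def floyd_row_alt (n : Int) : List Int :=
  let start := PySem.Int.floordiv ((n - 1) * n) 2 + 1
  PySem.List.pyRange start (start + n) 1

-- ===== PRECONDITION & SPEC =====
-- Pre_ excludes n ≤ 0, where A's final[n-1] raises IndexError on the empty tuple.
def Pre_floyd_row (n : Int) : Prop := 1 ≤ n
instance (n : Int) : Decidable (Pre_floyd_row n) := by unfold Pre_floyd_row; infer_instance
def pvWitness_floyd_row : Int := (4)

def Spec_floyd_row (n : Int) (out : List Int) : Prop := out = floyd_row_alt n
instance (n : Int) (out : List Int) : Decidable (Spec_floyd_row n out) := by unfold Spec_floyd_row; infer_instance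

-- ===== CLAIM (what is proved, stated in full; the proofs are below) =====
def Claim_equal_floyd_row : Prop := ∀ (n : Int), Dom_floyd_row n → Pre_floyd_row n → Spec_floyd_row n (floyd_row n)

-- ===== LEMMAS AND PROOFS =====

-- Inner loop: appends count, count+1, …, count+i-1 and advances count by i.
theorem inner_loop (i : Nat) (acc : List Int) (c : Int) :
    (PySem.List.pyRange 1 ((i : Int) + 1) 1).foldl
        (fun (st2 : List Int × Int) _j => (st2.1 ++ [st2.2], st2.2 + 1)) (acc, c)
      = (acc ++ PySem.List.pyRange c (c + i) 1, c + i) := by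
  induction i generalizing acc c with
  | zero =>
    simp [PySem.List.pyRange_one_eq_nil]
  | succ k ih =>
    push_cast
    rw [PySem.List.pyRange_one_succ_right (by omega),
        List.foldl_append, ih]
    simp only [List.foldl_cons, List.foldl_nil]
    rw [show c + ((k : Int) + 1) = (c + k) + 1 by ring,
        PySem.List.pyRange_one_succ_right (by omega)]
    simp

-- Row m of Floyd's triangle.
def floydRowOf (m : Int) : List Int :=
  PySem.List.pyRange ((m - 1) * m / 2 + 1) ((m - 1) * m / 2 + 1 + m) 1

-- Rows 1..k, built back-to-front.
def floydRows : Nat → List (List Int)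
  | 0 => []
  | k + 1 => floydRows k ++ [floydRowOf ((k : Int) + 1)]

theorem floydRows_length (k : Nat) : (floydRows k).length = k := by
  induction k with
  | zero => rfl
  | succ m ih => simp [floydRows, ih]

-- Outer loop invariant: after rows 1..k, result = [row 1, …, row k] and count = k(k+1)/2 + 1.
theorem outer_loop (k : Nat) :
    (PySem.List.pyRange 1 ((k : Int) + 1) 1).foldl
        (fun (st : List (List Int) × Int) i =>
          (st.1 ++ [((PySem.List.pyRange 1 (i + 1) 1).foldl
              (fun (st2 : List Int × Int) _j => (st2.1 ++ [st2.2], st2.2 + 1))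
              ([], st.2)).1],
            ((PySem.List.pyRange 1 (i + 1) 1).foldl
              (fun (st2 : List Int × Int) _j => (st2.1 ++ [st2.2], st2.2 + 1))
              ([], st.2)).2))
        ([], 1)
      = (floydRows k, (k : Int) * ((k : Int) + 1) / 2 + 1) := by
  induction k with
  | zero => simp [PySem.List.pyRange_one_eq_nil, floydRows]
  | succ m ih =>
    push_cast
    rw [PySem.List.pyRange_one_succ_right (by omega),
        List.foldl_append, ih]
    simp only [List.foldl_cons, List.foldl_nil]
    have hm : ((m : Int) + 1) = (((m + 1 : Nat) : Int)) := by push_cast; ring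
    rw [show ((m : Int) + 1) + 1 = (((m + 1 : Nat) : Int)) + 1 by push_cast; ring,
        inner_loop (m + 1)]
    push_cast
    rw [Prod.mk.injEq]
    constructor
    · show floydRows m ++ [[] ++ _] = floydRows (m + 1)
      rw [floydRows]
      congr 2
      unfold floydRowOf
      have h1 : ((m : Int) + 1 - 1) * ((m : Int) + 1) / 2 + 1 = (m : Int) * ((m : Int) + 1) / 2 + 1 := by
        ring_nf
      rw [List.nil_append, h1]
    · have : ((m : Int) + 1) * ((m : Int) + 1 + 1) = (m : Int) * ((m : Int) + 1) + 2 * ((m : Int) + 1) := by ring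
      rw [this]
      omega

-- ===== VERDICT (by name: the statement is the Claim_ definition above) =====
theorem floyd_row_spec : Claim_equal_floyd_row := by
  intro n _ hn
  unfold Pre_floyd_row at hn
  unfold Spec_floyd_row floyd_row floyd_row_alt
  obtain ⟨k, rfl⟩ : ∃ k : Nat, n = (k : Int) + 1 := ⟨(n - 1).toNat, by omega⟩
  simp only
  rw [show ((k : Int) + 1 + 1) = (((k + 1 : Nat) : Int) + 1) by push_cast; ring,
      outer_loop (k + 1)]
  simp only
  have hidx : ((k : Int) + 1 - 1) = (k : Nat) := by omega
  rw [hidx, PySem.List.pyGet?_natCast]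
  have hcat : (floydRows k ++ [floydRowOf ((k : Int) + 1)])[k]? = some (floydRowOf ((k : Int) + 1)) := by
    simp [floydRows_length]
  rw [floydRows, hcat]
  simp only [Option.getD_some]
  unfold floydRowOf
  have h2 : PySem.Int.floordiv ((k : Int) * ((k : Int) + 1)) 2 = (k : Int) * ((k : Int) + 1) / 2 := by
    simp only [PySem.Int.floordiv]
    rw [Int.fdiv_eq_ediv]
    simp
  rw [h2, show ((k : Int) + 1 - 1) * ((k : Int) + 1) = (k : Int) * ((k : Int) + 1) by ring]
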